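-- pv_equiv track=rewrite | github.com/Jairamjavv/python-works | competitive-programming/leetcode-python/anagram_1.py | minStepsDefaultDict
-- ===== SOURCE A (Python) =====
-- from collections import defaultdict
--
-- def minStepsDefaultDict(s: str, t: str) -> int:
--
--     # Count frequency of each character in s
--     freq_s = defaultdict(int)
--     for char in s:
--         freq_s[char] += 1
--
--     # Count frequency of each character in t
--     freq_t = defaultdict(int)
--     for char in t:
--         freq_t[char] += 1
--
--     # Calculate the difference in frequencies
--     steps = 0
--     for char in freq_s:
--         if freq_s[char] > freq_t[char]:
--             steps += freq_s[char] - freq_t[char]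
--
--     return steps
-- ===== SOURCE B (Python) =====
-- from collections import Counter
--
-- def minStepsDefaultDict(s: str, t: str) -> int:
--     # Single consuming pass over s: each char of s uses up one matching char
--     # from t's multiset if available, otherwise it must be deleted.
--     avail = Counter(t)
--     steps = 0
--     for c in s:
--         if avail[c] > 0:
--             avail[c] -= 1
--         else:
--             steps += 1
--     return steps
-- ===== Notes on version B (the rewrite author's own statement) =====
-- stated objective: alternative
-- what changed: Replaced A's count-both-then-compare-per-key scheme with a greedy matching pass: build only t's counter as a budget and scan s once, consuming one unit of budget per matched character and counting every unmatched character of s as a deletion; the per-distinct-character comparison loop disappears.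
import Mathlib
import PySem

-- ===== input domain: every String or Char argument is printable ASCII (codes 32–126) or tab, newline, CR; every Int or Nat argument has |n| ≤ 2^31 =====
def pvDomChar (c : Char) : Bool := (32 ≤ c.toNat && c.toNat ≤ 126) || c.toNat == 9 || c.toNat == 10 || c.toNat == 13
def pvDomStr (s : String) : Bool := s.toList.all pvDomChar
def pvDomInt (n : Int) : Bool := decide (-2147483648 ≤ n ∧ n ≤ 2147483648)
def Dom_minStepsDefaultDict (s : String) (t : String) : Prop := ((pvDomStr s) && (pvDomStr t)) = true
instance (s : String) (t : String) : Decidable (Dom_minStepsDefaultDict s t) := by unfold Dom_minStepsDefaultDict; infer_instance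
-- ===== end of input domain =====

-- B replaces A's count-both-then-compare-per-key scheme with a greedy matching pass:
-- only t's counter is built as a budget and s is scanned once, consuming budget per
-- matched char and counting every unmatched char of s as a deletion (alternative).

-- ===== PORT A =====
def minStepsDefaultDict (s : String) (t : String) : Int :=
  -- freq_s = defaultdict(int); for char in s: freq_s[char] += 1
  let freq_s := s.toList.foldl (fun d c => d.modify c 0 (· + 1)) (PySem.Dict.empty : PySem.Dict Char Int)
  -- freq_t = defaultdict(int); for char in t: freq_t[char] += 1
  let freq_t := t.toList.foldl (fun d c => d.modify c 0 (· + 1)) (PySem.Dict.empty : PySem.Dict Char Int)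
  -- steps = 0; for char in freq_s: if freq_s[char] > freq_t[char]: steps += diff
  freq_s.keys.foldl
    (fun steps c =>
      if freq_s.getD c 0 > freq_t.getD c 0 then steps + (freq_s.getD c 0 - freq_t.getD c 0)
      else steps) 0

-- ===== PORT B =====
-- for c in s: if avail[c] > 0: avail[c] -= 1 else: steps += 1
def pvConsume : List Char → PySem.Dict Char Int → Int → Int
  | [], _, steps => steps
  | c :: rest, avail, steps =>
    if avail.getD c 0 > 0 then pvConsume rest (avail.modify c 0 (· - 1)) steps
    else pvConsume rest avail (steps + 1)

def minStepsDefaultDict_alt (s : String) (t : String) : Int :=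
  -- avail = Counter(t)
  pvConsume s.toList (PySem.Dict.counter t.toList) 0

-- ===== PRECONDITION & SPEC =====
def Spec_minStepsDefaultDict (s : String) (t : String) (out : Int) : Prop := out = minStepsDefaultDict_alt s t
instance (s : String) (t : String) (out : Int) : Decidable (Spec_minStepsDefaultDict s t out) := by unfold Spec_minStepsDefaultDict; infer_instance

-- ===== CLAIM (what is proved, stated in full; the proofs are below) =====
def Claim_equal_minStepsDefaultDict : Prop := ∀ (s : String) (t : String), Dom_minStepsDefaultDict s t → Spec_minStepsDefaultDict s t (minStepsDefaultDict s t)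

-- ===== LEMMAS AND PROOFS =====

-- pointwise-equal step functions give equal folds
theorem pvFoldl_congr {α β : Type} (l : List α) (f g : β → α → β) (init : β)
    (h : ∀ b a, f b a = g b a) : l.foldl f init = l.foldl g init := by
  induction l generalizing init with
  | nil => rfl
  | cons x xs ih => simp only [List.foldl]; rw [h]; exact ih _

-- bumping f at one element of a duplicate-free list bumps the mapped sum by one
theorem pvSum_map_bump {u : List Char} (hu : u.Nodup) {c : Char} (hc : c ∈ u)
    (f g : Char → Int) (hne : ∀ x, x ≠ c → f x = g x) (hcc : f c = g c + 1) :
    (u.map f).sum = (u.map g).sum + 1 := by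
  induction u with
  | nil => cases hc
  | cons a us ih =>
    rcases List.nodup_cons.mp hu with ⟨hna, hus⟩
    rcases List.mem_cons.mp hc with rfl | hmem
    · have : us.map f = us.map g := by
        apply List.map_congr_left
        intro x hx
        exact hne x (fun h => hna (h ▸ hx))
      simp [this, hcc]; ring
    · have hac : a ≠ c := fun h => by subst h; exact hna hmem
      simp only [List.map_cons, List.sum_cons, hne a hac, ih hus hmem]
      ring

-- invariant of the greedy consuming pass: with a nonnegative budget d, the result is
-- steps plus the total surplus of l over d, summed over any nodup list u ⊇ l
theorem pvConsume_eq (l : List Char) (u : List Char) (d : PySem.Dict Char Int) (k : Int)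
    (hu : u.Nodup) (hl : ∀ c ∈ l, c ∈ u) (hd : ∀ c, 0 ≤ d.getD c 0) :
    pvConsume l d k = k + (u.map (fun c => max ((l.count c : Int) - d.getD c 0) 0)).sum := by
  induction l generalizing d k with
  | nil =>
    have hz : (u.map (fun c => max ((([] : List Char).count c : Int) - d.getD c 0) 0)).sum = 0 := by
      apply List.sum_eq_zero
      intro x hx
      obtain ⟨c, _, rfl⟩ := List.mem_map.mp hx
      have := hd c
      simp; omega
    rw [pvConsume, hz]; ring
  | cons c rest ih =>
    have hcu : c ∈ u := hl c List.mem_cons_self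
    have hrest : ∀ x ∈ rest, x ∈ u := fun x hx => hl x (List.mem_cons_of_mem _ hx)
    by_cases h : d.getD c 0 > 0
    · rw [pvConsume, if_pos h]
      have hd' : ∀ x, 0 ≤ (d.modify c 0 (· - 1)).getD x 0 := by
        intro x
        rw [PySem.Dict.getD_modify]
        split_ifs with hx
        · subst hx; omega
        · exact hd x
      rw [ih (d.modify c 0 (· - 1)) k hrest hd']
      congr 2
      apply List.map_congr_left
      intro x _
      rw [PySem.Dict.getD_modify]
      by_cases hx : x = c
      · subst hx; simp; congr 1; ring
      · simp [Ne.symm hx, hx]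
    · rw [pvConsume, if_neg h]
      have hc0 : d.getD c 0 = 0 := le_antisymm (by omega) (hd c)
      rw [ih d (k + 1) hrest hd]
      have hb := pvSum_map_bump hu hcu
        (fun x => max (((c :: rest).count x : Int) - d.getD x 0) 0)
        (fun x => max ((rest.count x : Int) - d.getD x 0) 0)
        (by intro x hx; simp [Ne.symm hx])
        (by simp [hc0]; omega)
      rw [hb]; ring

-- ===== VERDICT (by name: the statement is the Claim_ definition above) =====
theorem minStepsDefaultDict_spec : Claim_equal_minStepsDefaultDict := by
  intro s t _
  show minStepsDefaultDict s t = minStepsDefaultDict_alt s t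
  unfold minStepsDefaultDict minStepsDefaultDict_alt
  simp only [PySem.Dict.keys_foldl_modify, PySem.Dict.keys_empty,
    PySem.Dict.getD_foldl_modify_add_one, PySem.Dict.getD_empty]
  have hupd : PySem.Set.update ([] : List Char) s.toList = PySem.Set.ofList s.toList := rfl
  rw [hupd]
  rw [pvConsume_eq s.toList (PySem.Set.ofList s.toList) (PySem.Dict.counter t.toList) 0
    (PySem.Set.nodup_ofList _) (fun c hc => (PySem.Set.mem_ofList _ _).mpr hc)
    (fun c => by rw [PySem.Dict.getD_counter]; positivity)]
  rw [pvFoldl_congr _ _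
    (fun acc c => acc + max ((s.toList.count c : Int) - (t.toList.count c : Int)) 0) 0
    (by intro b c; simp only [zero_add]; split_ifs with h <;> omega)]
  rw [PySem.List.foldl_add]
  congr 2
  apply List.map_congr_left
  intro x _
  rw [PySem.Dict.getD_counter]
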